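-- pv_equiv track=rewrite | github.com/pypi-data/pypi-mirror-386 | packages/cgse/cgse-0.16.13.tar.gz/cgse-0.16.13/projects/generic/symetrie-hexapod/src/egse/hexapod/symetrie/pmac.py | decode_Q36
-- ===== SOURCE A (Python) =====
-- def decode_Q36(value):
--     """
--     Decode the bitfield variable Q36.
--
--     Each bit in this variable represents the status of a particular system setting of the hexapod.
--
--     Returns an array with the value (True/False) of the individual bits.
--     """
--
--     # This description is taken from the API PUNA Hexapod Controller Manual, version A, section 4.5.6 STATE#HEXA?
--
--     description = [  # noqa: F841
--         "Error (OR)",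
--         "System Initialized",
--         "In position",
--         "Control loop on servo motors active",
--         "Homing done",
--         "Brake control output",
--         "Emergency stop button engaged",
--         "Following error (warning)",
--         "Following error",
--         "Actuator out of bounds error",
--         "Amplifier Error",
--         "Encoder error",
--         "Phasing error (brushless motors only)",
--         "Homing error",
--         "Kinematic error",
--         '"Abort" input error',
--         "R/W flash memory error",
--         "Temperature error on one or several motors",
--         "Home done (virtual)",
--         "Encoders power off",
--         "Limit switches power off",
--         "Reserved",
--         "Reserved",
--         "Reserved",
--     ]
--
--     bit_values = [False for x in range(24)]
--
--     for bit in range(24):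
--         bit_values[bit] = True if value >> bit & 0x01 else False
--
--     return bit_values
-- ===== SOURCE B (Python) =====
-- def decode_Q36(value):
--     """Decode the bitfield variable Q36 into a list of 24 booleans (LSB first)."""
--     bits = format(value & 0xFFFFFF, '024b')
--     return [c == '1' for c in reversed(bits)]
-- ===== Notes on version B (the rewrite author's own statement) =====
-- stated objective: idiomatic
-- what changed: B converts the masked low bits of value to their fixed-width binary-string representation (format with the twenty-four-bit mask applied) and maps the reversed characters to booleans, replacing A's per-bit shift-and-mask loop over a preallocated list.
import Mathlib
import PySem

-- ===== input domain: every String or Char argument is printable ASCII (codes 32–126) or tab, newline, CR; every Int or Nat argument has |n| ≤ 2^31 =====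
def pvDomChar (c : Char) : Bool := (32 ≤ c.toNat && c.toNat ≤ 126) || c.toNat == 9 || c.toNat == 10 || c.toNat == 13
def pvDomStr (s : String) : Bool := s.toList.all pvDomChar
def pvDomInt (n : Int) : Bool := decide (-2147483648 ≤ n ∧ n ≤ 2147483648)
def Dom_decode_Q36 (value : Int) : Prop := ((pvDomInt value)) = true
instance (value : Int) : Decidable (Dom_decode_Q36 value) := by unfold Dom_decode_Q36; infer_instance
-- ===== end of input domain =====

-- B decodes the bitfield via the fixed-width binary-string representation of the masked value
-- (format, reversed, mapped to booleans) instead of A's per-bit shift-and-mask loop: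
-- an idiomatic alternative, not claimed faster; return values proved equal for all Int inputs in Dom.


-- ===== PORT A =====
-- (the `description` list in A is unused (noqa: F841) and is omitted)
-- bit_values = [False for x in range(24)]; for bit in range(24): bit_values[bit] = True if value >> bit & 0x01 else False
def decode_Q36 (value : Int) : List Bool :=
  let bit_values : List Bool := (List.range 24).map (fun _ => false)
  (PySem.List.pyRange 0 24 1).foldl
    (fun bv bit => bv.set bit.toNat (if Int.land (Int.shiftRight value bit.toNat) 1 ≠ 0 then true else false))
    bit_values

-- ===== PORT B =====
-- binary digits of n, most-significant first (the digits of format(n, 'b') without leading zeros; [] for 0)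
def pvBinDigits : Nat → List Char
  | 0 => []
  | n+1 => pvBinDigits ((n+1)/2) ++ [if (n+1) % 2 == 1 then '1' else '0']

-- bits = format(value & 0xFFFFFF, '024b'); return [c == '1' for c in reversed(bits)]
def decode_Q36_alt (value : Int) : List Bool :=
  let s := pvBinDigits (Int.land value 16777215).toNat
  let bits := List.replicate (24 - s.length) '0' ++ s
  bits.reverse.map (fun c => c == '1')

-- ===== PRECONDITION & SPEC =====
def Spec_decode_Q36 (value : Int) (out : List Bool) : Prop := out = decode_Q36_alt value
instance (value : Int) (out : List Bool) : Decidable (Spec_decode_Q36 value out) := by unfold Spec_decode_Q36; infer_instance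

-- ===== CLAIM (what is proved, stated in full; the proofs are below) =====
def Claim_equal_decode_Q36 : Prop := ∀ (value : Int), Dom_decode_Q36 value → Spec_decode_Q36 value (decode_Q36 value)

-- ===== LEMMAS AND PROOFS =====

theorem pv_ldiff_one (k : Nat) : Nat.ldiff 1 k = if k % 2 = 1 then 0 else 1 := by
  apply Nat.eq_of_testBit_eq
  intro j
  rw [Nat.testBit_ldiff]
  rcases j with _ | j
  · simp [Nat.testBit_eq_decide_div_mod_eq]
    split <;> simp_all
  · have h1 : (1:Nat) / 2 ^ (j+1) = 0 :=
      Nat.div_eq_of_lt (Nat.one_lt_two_pow (by omega))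
    simp [Nat.testBit_eq_decide_div_mod_eq, h1]
    split <;> simp [h1]

theorem pv_bitA (v : Int) (i : Nat) :
    Int.land (v >>> i) 1 = if v.testBit i then 1 else 0 := by
  cases v with
  | ofNat n =>
    show Int.land (Int.ofNat (n >>> i)) 1 = _
    simp only [Int.land, Int.testBit, Nat.and_one_is_mod, Nat.testBit_eq_decide_div_mod_eq,
      Nat.shiftRight_eq_div_pow]
    rcases Nat.mod_two_eq_zero_or_one (n / 2 ^ i) with h | h <;> simp [h]
  | negSucc n =>
    show Int.land (Int.negSucc (n >>> i)) 1 = _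
    simp only [Int.land, Int.testBit, pv_ldiff_one, Nat.testBit_eq_decide_div_mod_eq,
      Nat.shiftRight_eq_div_pow]
    rcases Nat.mod_two_eq_zero_or_one (n / 2 ^ i) with h | h <;> simp [h]

theorem pv_bitA' (v : Int) (i : Nat) :
    (if Int.land (v >>> i) 1 ≠ 0 then true else false) = v.testBit i := by
  rw [pv_bitA]
  cases h : v.testBit i <;> simp

-- A's loop: setting index k to the k-th bit, for k = 0 .. n-1, in ascending order
theorem pv_loop (v : Int) :
    ∀ (n : Nat) (l : List Bool), n ≤ l.length →
      ((List.range n).map (fun (k : Nat) => (k : Int))).foldl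
          (fun bv bit => bv.set bit.toNat (if Int.land (Int.shiftRight v bit.toNat) 1 ≠ 0 then true else false)) l
        = (List.range n).map (fun k => if Int.land (Int.shiftRight v k) 1 ≠ 0 then true else false) ++ l.drop n := by
  intro n
  induction n with
  | zero => simp
  | succ n ih =>
    intro l hl
    rw [List.range_succ, List.map_append, List.foldl_append, ih l (by omega)]
    simp only [List.map_cons, List.map_nil, List.foldl_cons, List.foldl_nil, Int.toNat_natCast]
    rw [List.set_append_right _ _ (by simp), List.length_map, List.length_range, Nat.sub_self]
    rw [List.drop_eq_getElem_cons (show n < l.length by omega), List.set_cons_zero]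
    simp only [List.map_append, List.map_cons, List.map_nil, List.append_assoc,
      List.singleton_append]
    rfl

theorem pv_A_eq (v : Int) :
    decode_Q36 v = (List.range 24).map (fun i => v.testBit i) := by
  simp only [decode_Q36]
  rw [PySem.List.pyRange_zero]
  have h24 : ((24 : Int)).toNat = 24 := rfl
  rw [h24, pv_loop v 24 _ (by simp)]
  have hdrop : List.drop 24 ((List.range 24).map (fun _ => false)) = ([] : List Bool) := by simp
  rw [hdrop, List.append_nil]
  apply List.map_congr_left
  intro i _
  rw [← Int.shiftRight_eq, pv_bitA']

-- B-side: the masked value is a nonnegative 24-bit natural carrying value's low bits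
theorem pv_mask_nonneg (v : Int) : 0 ≤ Int.land v 16777215 := by
  cases v <;> simp [Int.land]

theorem pv_mask_bit (v : Int) (i : Nat) :
    ((Int.land v 16777215).toNat).testBit i = (v.testBit i && decide (i < 24)) := by
  have h1 : (((Int.land v 16777215).toNat : Nat) : Int) = Int.land v 16777215 :=
    Int.toNat_of_nonneg (pv_mask_nonneg v)
  have h2 : ((Int.land v 16777215).toNat).testBit i
      = (((Int.land v 16777215).toNat : Nat) : Int).testBit i := rfl
  rw [h2, h1, Int.testBit_land]
  have hm : (16777215 : Int).testBit i = decide (i < 24) := by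
    show Nat.testBit 16777215 i = decide (i < 24)
    have h3 : (16777215 : Nat) = 2 ^ 24 - 1 := by norm_num
    rw [h3, Nat.testBit_two_pow_sub_one]
  rw [hm]

theorem pv_mask_lt (v : Int) : (Int.land v 16777215).toNat < 2 ^ 24 := by
  apply Nat.lt_pow_two_of_testBit
  intro i hi
  simp [pv_mask_bit, show ¬ i < 24 by omega]

theorem pv_mask_testBit (v : Int) (i : Nat) (hi : i < 24) :
    ((Int.land v 16777215).toNat).testBit i = v.testBit i := by
  simp [pv_mask_bit, hi]

theorem pv_binDigits_eq (n : Nat) (hn : n ≠ 0) :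
    pvBinDigits n = pvBinDigits (n / 2) ++ [if n % 2 == 1 then '1' else '0'] := by
  cases n with
  | zero => exact absurd rfl hn
  | succ m => rw [pvBinDigits]

-- LSB-first characterisation of the zero-padded digit string
theorem pv_binOk (k : Nat) : ∀ n, n < 2 ^ k →
    ((List.replicate (k - (pvBinDigits n).length) '0' ++ pvBinDigits n).reverse).map
        (fun c => c == '1')
      = (List.range k).map (fun i => n.testBit i) := by
  induction k with
  | zero =>
    intro n hn
    interval_cases n
    simp [pvBinDigits]
  | succ k ih =>
    intro n hn
    by_cases h0 : n = 0
    · subst h0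
      simp only [pvBinDigits, List.append_nil, List.reverse_replicate, List.map_replicate,
        Nat.zero_testBit]
      have hc : ('0' == '1') = false := by decide
      rw [hc]
      symm
      rw [List.eq_replicate_iff]
      simp
    · have hdiv : n / 2 < 2 ^ k := by
        have := Nat.pow_succ 2 k
        omega
      have ihh := ih (n / 2) hdiv
      rw [pv_binDigits_eq n h0]
      have hL : (pvBinDigits (n / 2) ++ [if n % 2 == 1 then '1' else '0']).length
          = (pvBinDigits (n / 2)).length + 1 := by simp
      rw [hL]
      have hsub : k + 1 - ((pvBinDigits (n / 2)).length + 1)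
          = k - (pvBinDigits (n / 2)).length := by omega
      rw [hsub]
      simp only [List.reverse_append] at ihh
      rw [List.map_append] at ihh
      simp only [List.reverse_append, List.reverse_cons, List.reverse_nil, List.nil_append,
        List.singleton_append, List.map_cons, List.map_append,
        List.range_succ_eq_map, List.map_map]
      refine List.cons_eq_cons.mpr ⟨?_, ?_⟩
      · rcases Nat.mod_two_eq_zero_or_one n with h | h <;>
          simp [h, Nat.testBit_eq_decide_div_mod_eq]
      · rw [List.append_eq, ihh]
        apply List.map_congr_left
        intro i _
        simp [Function.comp, Nat.testBit_succ]

theorem pv_B_eq (v : Int) :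
    decode_Q36_alt v = (List.range 24).map (fun i => v.testBit i) := by
  unfold decode_Q36_alt
  rw [pv_binOk 24 _ (pv_mask_lt v)]
  apply List.map_congr_left
  intro i hi
  exact pv_mask_testBit v i (List.mem_range.mp hi)

-- ===== VERDICT (by name: the statement is the Claim_ definition above) =====
theorem decode_Q36_spec : Claim_equal_decode_Q36 := by
  intro v _
  unfold Spec_decode_Q36
  rw [pv_A_eq, pv_B_eq]
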